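-- pv_equiv track=rewrite | github.com/AnimalByte/AWphase | python/awphase_py/phase7a_panel_ld_fill_v2.py | nearby_anchors
-- ===== SOURCE A (Python) =====
-- import bisect
--
-- def nearby_anchors(pos, anchor_positions, max_dist, max_anchors_each_side):
--     i = bisect.bisect_left(anchor_positions, pos)
--     out = []
--
--     j = i - 1
--     n = 0
--     while j >= 0 and n < max_anchors_each_side:
--         d = pos - anchor_positions[j]
--         if d > max_dist:
--             break
--         out.append((anchor_positions[j], d))
--         j -= 1
--         n += 1
--
--     j = i
--     n = 0
--     while j < len(anchor_positions) and n < max_anchors_each_side: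
--         d = anchor_positions[j] - pos
--         if d > max_dist:
--             break
--         out.append((anchor_positions[j], d))
--         j += 1
--         n += 1
--
--     return out
-- ===== SOURCE B (Python) =====
-- import bisect
--
-- def nearby_anchors(pos, anchor_positions, max_dist, max_anchors_each_side):
--     i = bisect.bisect_left(anchor_positions, pos)
--     lo = bisect.bisect_left(anchor_positions, pos - max_dist)
--     hi = bisect.bisect_right(anchor_positions, pos + max_dist)
--     cap = max(max_anchors_each_side, 0)
--     start = max(lo, i - cap)
--     stop = min(hi, i + cap)
--     left = [(a, pos - a) for a in reversed(anchor_positions[start:i])]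
--     right = [(a, a - pos) for a in anchor_positions[i:stop]]
--     return left + right
-- ===== Notes on version B (the rewrite author's own statement) =====
-- stated objective: alternative
-- what changed: B replaces A's two per-element while-loops (compare each distance, break) by two extra binary searches (bisect_left/bisect_right) that locate the distance boundaries directly, then builds both sides from plain slices whose endpoints are min/max of the bisect bounds and the count cap.
-- outside the precondition, e.g. on nearby_anchors(7, [5, -4, 3, -2], 4, 2): A returns [], B returns [(-2, 9), (3, 4)]
import Mathlib
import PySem

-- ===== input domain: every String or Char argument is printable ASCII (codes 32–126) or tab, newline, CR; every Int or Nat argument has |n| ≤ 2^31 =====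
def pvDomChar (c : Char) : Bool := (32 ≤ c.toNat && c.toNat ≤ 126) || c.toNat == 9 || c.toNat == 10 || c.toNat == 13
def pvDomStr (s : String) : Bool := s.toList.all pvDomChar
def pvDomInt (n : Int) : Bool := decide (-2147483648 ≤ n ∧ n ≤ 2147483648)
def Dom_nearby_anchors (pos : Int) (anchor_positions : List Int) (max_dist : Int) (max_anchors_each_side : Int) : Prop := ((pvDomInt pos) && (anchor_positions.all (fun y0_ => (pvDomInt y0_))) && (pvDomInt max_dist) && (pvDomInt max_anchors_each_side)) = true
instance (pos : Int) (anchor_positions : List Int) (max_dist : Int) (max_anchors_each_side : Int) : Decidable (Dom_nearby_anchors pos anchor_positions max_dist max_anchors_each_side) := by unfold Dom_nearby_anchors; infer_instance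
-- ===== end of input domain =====

-- B replaces A's two per-element scan-and-break while-loops by two extra binary searches for the
-- distance boundaries plus plain slices (objective: alternative algorithm, same asymptotic cost).

-- ===== PORT A =====
-- A's first while loop: j walks left from i-1, n counts; stops on j<0 or n>=cap, breaks on d>max_dist.
-- (the index j is nonnegative and below len whenever the element access is reached, so pyGetD's default 0 is never used)
def nearbyLeftLoop (pos : Int) (ap : List Int) (max_dist : Int) (cap : Int) (j : Int) (n : Int) : List (Int × Int) :=
  if h : 0 ≤ j ∧ n < cap then
    let d := pos - PySem.List.pyGetD ap j 0
    if d > max_dist then []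
    else (PySem.List.pyGetD ap j 0, d) :: nearbyLeftLoop pos ap max_dist cap (j - 1) (n + 1)
  else []
termination_by (j + 1).toNat
decreasing_by omega

-- A's second while loop: j walks right from i; stops on j>=len or n>=cap, breaks on d>max_dist.
def nearbyRightLoop (pos : Int) (ap : List Int) (max_dist : Int) (cap : Int) (j : Int) (n : Int) : List (Int × Int) :=
  if h : j < (ap.length : Int) ∧ n < cap then
    let d := PySem.List.pyGetD ap j 0 - pos
    if d > max_dist then []
    else (PySem.List.pyGetD ap j 0, d) :: nearbyRightLoop pos ap max_dist cap (j + 1) (n + 1)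
  else []
termination_by ((ap.length : Int) - j).toNat
decreasing_by omega

def nearby_anchors (pos : Int) (anchor_positions : List Int) (max_dist : Int) (max_anchors_each_side : Int) : List (Int × Int) :=
  let i : Int := (PySem.List.bisectLeft anchor_positions pos : Nat)
  nearbyLeftLoop pos anchor_positions max_dist max_anchors_each_side (i - 1) 0
    ++ nearbyRightLoop pos anchor_positions max_dist max_anchors_each_side i 0

-- ===== PORT B =====
def nearby_anchors_alt (pos : Int) (anchor_positions : List Int) (max_dist : Int) (max_anchors_each_side : Int) : List (Int × Int) :=
  let i : Int := (PySem.List.bisectLeft anchor_positions pos : Nat)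
  let lo : Int := (PySem.List.bisectLeft anchor_positions (pos - max_dist) : Nat)
  let hi : Int := (PySem.List.bisectRight anchor_positions (pos + max_dist) : Nat)
  let cap : Int := max max_anchors_each_side 0
  let start : Int := max lo (i - cap)
  let stop : Int := min hi (i + cap)
  let left := ((PySem.List.slice anchor_positions (some start) (some i)).reverse).map (fun a => (a, pos - a))
  let right := (PySem.List.slice anchor_positions (some i) (some stop)).map (fun a => (a, a - pos))
  left ++ right

-- ===== PRECONDITION & SPEC =====
-- Pre_ excludes unsorted anchor_positions (unless max_anchors_each_side ≤ 0, where both sides are trivially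
-- empty): bisect's contract requires a sorted list, and on unsorted input A's returned value is an accident
-- of binary-search probing that no caller would specify.
def Pre_nearby_anchors (pos : Int) (anchor_positions : List Int) (max_dist : Int) (max_anchors_each_side : Int) : Prop :=
  List.Pairwise (fun x1 x2 => x1 ≤ x2) anchor_positions ∨ max_anchors_each_side ≤ 0
instance (pos : Int) (anchor_positions : List Int) (max_dist : Int) (max_anchors_each_side : Int) : Decidable (Pre_nearby_anchors pos anchor_positions max_dist max_anchors_each_side) := by unfold Pre_nearby_anchors; infer_instance

def pvWitness_nearby_anchors : Int × List Int × Int × Int := (5, [1, 3, 5, 8], 3, 2)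

def Spec_nearby_anchors (pos : Int) (anchor_positions : List Int) (max_dist : Int) (max_anchors_each_side : Int) (out : List (Int × Int)) : Prop := out = nearby_anchors_alt pos anchor_positions max_dist max_anchors_each_side
instance (pos : Int) (anchor_positions : List Int) (max_dist : Int) (max_anchors_each_side : Int) (out : List (Int × Int)) : Decidable (Spec_nearby_anchors pos anchor_positions max_dist max_anchors_each_side out) := by unfold Spec_nearby_anchors; infer_instance

-- ===== CLAIM (what is proved, stated in full; the proofs are below) =====
def Claim_equal_nearby_anchors : Prop := ∀ (pos : Int) (anchor_positions : List Int) (max_dist : Int) (max_anchors_each_side : Int), Dom_nearby_anchors pos anchor_positions max_dist max_anchors_each_side → Pre_nearby_anchors pos anchor_positions max_dist max_anchors_each_side → Spec_nearby_anchors pos anchor_positions max_dist max_anchors_each_side (nearby_anchors pos anchor_positions max_dist max_anchors_each_side)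

-- ===== LEMMAS AND PROOFS =====

-- the contiguous segment of indices [a, b) of ap
def seg (ap : List Int) (a b : Nat) : List Int := (ap.drop a).take (b - a)

theorem seg_empty (ap : List Int) {a b : Nat} (h : b ≤ a) : seg ap a b = [] := by
  simp [seg, Nat.sub_eq_zero_of_le h]

theorem seg_nil_of_len (ap : List Int) {a b : Nat} (h : ap.length ≤ a) : seg ap a b = [] := by
  simp [seg, List.drop_eq_nil_iff.mpr (by omega)]

theorem seg_snoc (ap : List Int) {a k : Nat} (ha : a ≤ k) (hk : k < ap.length) :
    seg ap a (k + 1) = seg ap a k ++ [ap[k]] := by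
  simp only [seg]
  have h1 : k + 1 - a = (k - a) + 1 := by omega
  rw [h1, List.take_succ]
  congr 1
  rw [List.getElem?_drop]
  have h2 : a + (k - a) = k := by omega
  rw [h2, List.getElem?_eq_getElem hk]
  rfl

theorem seg_cons (ap : List Int) {a m : Nat} (ha : a < m) (hk : a < ap.length) :
    seg ap a m = ap[a] :: seg ap (a + 1) m := by
  simp only [seg]
  rw [List.drop_eq_getElem_cons hk]
  have h1 : m - a = (m - (a + 1)) + 1 := by omega
  rw [h1, List.take_succ_cons]

theorem slice_eq_seg (ap : List Int) (a b : Nat) :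
    PySem.List.slice ap (some (a : Int)) (some (b : Int)) = seg ap a b := by
  rw [PySem.List.slice_natCast]; rfl

-- A's left loop, on a sorted list, emits exactly the segment [max(lo, jn-(cap-n)), jn) in reverse
theorem left_loop_eq (pos : Int) (ap : List Int) (max_dist cap : Int)
    (hs : List.Pairwise (fun x1 x2 => x1 ≤ x2) ap) :
    ∀ (jn : Nat) (n : Int), jn ≤ PySem.List.bisectLeft ap pos →
      nearbyLeftLoop pos ap max_dist cap ((jn : Int) - 1) n =
        ((seg ap (max (PySem.List.bisectLeft ap (pos - max_dist)) (jn - (cap - n).toNat)) jn).reverse).map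
          (fun a => (a, pos - a)) := by
  obtain ⟨hloLen, hloLt, hloGe⟩ := PySem.List.bisectLeft_spec ap (pos - max_dist) hs
  obtain ⟨hiLen, _, _⟩ := PySem.List.bisectLeft_spec ap pos hs
  intro jn
  induction jn with
  | zero =>
    intro n _
    rw [nearbyLeftLoop, dif_neg (by omega), seg_empty ap (Nat.zero_le _)]
    simp
  | succ k ih =>
    intro n hk
    have hklen : k < ap.length := by omega
    have hj : ((k + 1 : Nat) : Int) - 1 = (k : Int) := by push_cast; ring
    rw [hj, nearbyLeftLoop]
    have e : PySem.List.pyGetD ap (k : Int) 0 = ap[k] := by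
      rw [PySem.List.pyGetD_natCast]; exact List.getD_eq_getElem ap 0 hklen
    by_cases hn : n < cap
    · rw [dif_pos ⟨by omega, hn⟩]
      simp only [e]
      by_cases hd : pos - ap[k] > max_dist
      · rw [if_pos hd]
        have hlo : k + 1 ≤ PySem.List.bisectLeft ap (pos - max_dist) := by
          by_contra hcon
          have := hloGe k hklen (by omega)
          omega
        rw [seg_empty ap (by omega)]
        simp
      · rw [if_neg hd]
        have hlo : PySem.List.bisectLeft ap (pos - max_dist) ≤ k := by
          by_contra hcon
          have := hloLt k hklen (by omega)
          omega
        rw [ih (n + 1) (by omega)]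
        have hmax : max (PySem.List.bisectLeft ap (pos - max_dist)) (k - (cap - (n + 1)).toNat)
            = max (PySem.List.bisectLeft ap (pos - max_dist)) (k + 1 - (cap - n).toNat) := by omega
        rw [hmax, seg_snoc ap (by omega) hklen]
        simp
    · rw [dif_neg (by omega)]
      have h0 : (cap - n).toNat = 0 := by omega
      rw [h0, seg_empty ap (by omega)]
      simp

-- A's right loop, on a sorted list, emits exactly the segment [jn, min(hi, jn+(cap-n)))
theorem right_loop_eq (pos : Int) (ap : List Int) (max_dist cap : Int)
    (hs : List.Pairwise (fun x1 x2 => x1 ≤ x2) ap) :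
    ∀ (k jn : Nat) (n : Int), ap.length ≤ jn + k →
      nearbyRightLoop pos ap max_dist cap (jn : Int) n =
        (seg ap jn (min (PySem.List.bisectRight ap (pos + max_dist)) (jn + (cap - n).toNat))).map
          (fun a => (a, a - pos)) := by
  obtain ⟨hhiLen, hhiLt, hhiGe⟩ := PySem.List.bisectRight_spec ap (pos + max_dist) hs
  intro k
  induction k with
  | zero =>
    intro jn n hlen
    rw [nearbyRightLoop, dif_neg (by omega), seg_nil_of_len ap (by omega)]
    simp
  | succ k ih =>
    intro jn n hlen
    by_cases hjl : jn < ap.length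
    · rw [nearbyRightLoop]
      have e : PySem.List.pyGetD ap (jn : Int) 0 = ap[jn] := by
        rw [PySem.List.pyGetD_natCast]; exact List.getD_eq_getElem ap 0 hjl
      by_cases hn : n < cap
      · rw [dif_pos ⟨by omega, hn⟩]
        simp only [e]
        by_cases hd : ap[jn] - pos > max_dist
        · rw [if_pos hd]
          have hhi : PySem.List.bisectRight ap (pos + max_dist) ≤ jn := by
            by_contra hcon
            have := hhiLt jn hjl (by omega)
            omega
          rw [seg_empty ap (by omega)]
          simp
        · rw [if_neg hd]
          have hhi : jn + 1 ≤ PySem.List.bisectRight ap (pos + max_dist) := by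
            by_contra hcon
            have := hhiGe jn hjl (by omega)
            omega
          have hcast : (jn : Int) + 1 = ((jn + 1 : Nat) : Int) := by push_cast; ring
          rw [hcast, ih (jn + 1) (n + 1) (by omega)]
          have hmin : min (PySem.List.bisectRight ap (pos + max_dist)) (jn + 1 + (cap - (n + 1)).toNat)
              = min (PySem.List.bisectRight ap (pos + max_dist)) (jn + (cap - n).toNat) := by omega
          rw [hmin, seg_cons ap (by omega) hjl]
          simp
      · rw [dif_neg (by omega)]
        have h0 : (cap - n).toNat = 0 := by omega
        rw [h0, seg_empty ap (by omega)]
        simp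
    · rw [nearbyRightLoop, dif_neg (by omega), seg_nil_of_len ap (by omega)]
      simp

-- when the cap is nonpositive both programs return [] on any list, sorted or not
theorem nearby_anchors_trivial_cap (pos : Int) (ap : List Int) (max_dist mases : Int)
    (hm : mases ≤ 0) :
    nearby_anchors pos ap max_dist mases = nearby_anchors_alt pos ap max_dist mases := by
  have lnil : ∀ j : Int, nearbyLeftLoop pos ap max_dist mases j 0 = [] := by
    intro j; rw [nearbyLeftLoop, dif_neg (by omega)]
  have rnil : ∀ j : Int, nearbyRightLoop pos ap max_dist mases j 0 = [] := by
    intro j; rw [nearbyRightLoop, dif_neg (by omega)]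
  have hc : max mases 0 = 0 := by omega
  unfold nearby_anchors nearby_anchors_alt
  simp only [lnil, rnil, hc]
  have h1 : (max ((PySem.List.bisectLeft ap (pos - max_dist) : Nat) : Int)
      (((PySem.List.bisectLeft ap pos : Nat) : Int) - 0))
      = ((max (PySem.List.bisectLeft ap (pos - max_dist)) (PySem.List.bisectLeft ap pos) : Nat) : Int) := by
    push_cast; omega
  have h2 : (min ((PySem.List.bisectRight ap (pos + max_dist) : Nat) : Int)
      (((PySem.List.bisectLeft ap pos : Nat) : Int) + 0))
      = ((min (PySem.List.bisectRight ap (pos + max_dist)) (PySem.List.bisectLeft ap pos) : Nat) : Int) := by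
    push_cast; omega
  rw [h1, h2, slice_eq_seg, slice_eq_seg,
    seg_empty ap (le_max_right _ _), seg_empty ap (min_le_right _ _)]
  simp

theorem nearby_anchors_sorted (pos : Int) (ap : List Int) (max_dist mases : Int)
    (hpre : List.Pairwise (fun x1 x2 => x1 ≤ x2) ap) :
    nearby_anchors pos ap max_dist mases = nearby_anchors_alt pos ap max_dist mases := by
  unfold nearby_anchors nearby_anchors_alt
  simp only []
  set i := PySem.List.bisectLeft ap pos with hidef
  set lo := PySem.List.bisectLeft ap (pos - max_dist) with hlodef
  set hi := PySem.List.bisectRight ap (pos + max_dist) with hhidef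
  have hleft := left_loop_eq pos ap max_dist mases hpre i 0 (le_refl i)
  have hright := right_loop_eq pos ap max_dist mases hpre ap.length i 0 (by omega)
  rw [hleft, hright]
  have hstart : (max (lo : Int) ((i : Int) - max mases 0)) = ((max lo (i - (mases - 0).toNat) : Nat) : Int) := by
    push_cast; omega
  have hstop : (min (hi : Int) ((i : Int) + max mases 0)) = ((min hi (i + (mases - 0).toNat) : Nat) : Int) := by
    push_cast; omega
  rw [hstart, hstop, slice_eq_seg, slice_eq_seg]

-- ===== VERDICT (by name: the statement is the Claim_ definition above) =====
theorem nearby_anchors_spec : Claim_equal_nearby_anchors := by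
  intro pos ap max_dist mases _ hpre
  unfold Spec_nearby_anchors
  rcases hpre with hs | hm
  · exact nearby_anchors_sorted pos ap max_dist mases hs
  · exact nearby_anchors_trivial_cap pos ap max_dist mases hm
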